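-- pv_equiv track=rewrite | github.com/ulli85/advent-of-code | 2024/21-2.py | numeric_path
-- ===== SOURCE A (Python) =====
-- NDPL_ARR = [['7', '8', '9'],
--             ['4', '5', '6'],
--             ['1', '2', '3'],
--             [None, '0', 'A']]
--
-- NDPL = {'7': [0, 0], '8': [0, 1], '9': [0, 2],
--         '4': [1, 0], '5': [1, 1], '6': [1, 2],
--         '1': [2, 0], '2': [2, 1], '3': [2, 2],
--         '0': [3, 1], 'A': [3, 2]
--         }
--
-- def numeric_path(start, row, out):
--     if start == row[0]: return out
--
--     ay, ax = NDPL[start]  # actual y,x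
--     ey, ex = NDPL[row[0]]  # end y, x
--     dy, dx = ey - ay, ex - ax
--
--     # directions neccessary to go
--     leftright = '<' if dx < 0 else '>'
--     updown = 'v' if dy > 0 else '^'
--
--     if dy == 0: return out + leftright * abs(dx)
--     if dx == 0: return out + updown * abs(dy)
--
--     # we continue in last direction, second rightmost character in out string, the rightmost is 'A' character
--     ld = None
--     if len(out) > 1: ld = out[-2]
--     if ld == leftright:
--         if ld == '>':
--             return numeric_path(NDPL_ARR[ay][ax + abs(dx)], row, out + '>' * abs(dx))
--         if ld == '<':
--             # cannot go through the gap
--             if start == 'A': return numeric_path('0', row, out + '<')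
--             if start == '0': return numeric_path('2', row, out + '^')
--         return numeric_path(NDPL_ARR[ay][ax - abs(dx)], row, out + '<' * abs(dx))
--
--     if ld == updown:
--         if ld == '^':
--             return numeric_path(NDPL_ARR[ay - abs(dy)][ax], row, out + '^' * abs(dy))
--         if ld == 'v':
--             # cannot go through the gap
--             if start == '7': return numeric_path('4', row, out + 'v')
--             if start == '4': return numeric_path('1', row, out + 'v')
--             if start == '1': return numeric_path('2', row, out + '>')
--         return numeric_path(NDPL_ARR[ay + abs(dy)][ax], row, out + 'v' * abs(dy))
--     # it's first run (first number of the sequence) and we do not have last direction yet, so we check the position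
--     # of the next number and plan transition so that, by the next number we could continue with the last direction used
--     # by this number
--     nnum = row[1]
--     nny, nnx = NDPL[nnum]
--     ndy, ndx = nny - ey, nnx - ex
--     # directions neccessary to go to the next number
--     nlright = '<' if ndx < 0 else '>'
--     if nlright == leftright: return abs(dx) * leftright + abs(dy) * updown
--     if leftright == '<': return leftright * abs(dx) + updown * abs(dy)
--     return updown * abs(dy) + leftright * abs(dx)
-- ===== SOURCE B (Python) =====
-- # Table-driven loop: keypad coordinates by arithmetic on the digit value, the gap
-- # detours as one lookup table, and a single uniform rule per move axis (objective: alternative).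
--
-- _DETOUR = {('A', '<'): ('0', '<'), ('0', '<'): ('2', '^'),
--            ('7', 'v'): ('4', 'v'), ('4', 'v'): ('1', 'v'), ('1', 'v'): ('2', '>')}
--
--
-- def _pos(c):
--     # position of a keypad button, computed arithmetically (no table)
--     if c == 'A':
--         return 3, 2
--     if c == '0':
--         return 3, 1
--     d = ord(c) - ord('0')
--     return 2 - (d - 1) // 3, (d - 1) % 3
--
--
-- def _btn(y, x):
--     # inverse of _pos: the button sitting at (y, x)
--     if y == 3:
--         return '0' if x == 1 else 'A'
--     return chr(ord('0') + 3 * (2 - y) + x + 1)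
--
--
-- def numeric_path(start, row, out):
--     while True:
--         t = row[0]
--         if start == t:
--             return out
--         ay, ax = _pos(start)
--         ey, ex = _pos(t)
--         dy, dx = ey - ay, ex - ax
--         lr = '<' if dx < 0 else '>'
--         ud = 'v' if dy > 0 else '^'
--         if dy == 0:
--             return out + lr * abs(dx)
--         if dx == 0:
--             return out + ud * abs(dy)
--         ld = out[-2] if len(out) > 1 else None
--         if ld != lr and ld != ud:
--             # no usable last direction: plan the whole move towards the next number
--             ny, nx = _pos(row[1])
--             first = abs(dy) * ud + abs(dx) * lr
--             if ('<' if nx - ex < 0 else '>') == lr or lr == '<':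
--                 first = abs(dx) * lr + abs(dy) * ud
--             return first
--         if (start, ld) in _DETOUR:
--             start, step = _DETOUR[(start, ld)]
--             out += step
--         elif ld == lr:
--             start, out = _btn(ay, ex), out + lr * abs(dx)
--         else:
--             start, out = _btn(ey, ax), out + ud * abs(dy)
-- ===== Notes on version B (the rewrite author's own statement) =====
-- stated objective: alternative
-- what changed: Replaces the table-driven tail recursion with a while loop that computes keypad coordinates by closed-form arithmetic on the digit value (no NDPL/NDPL_ARR tables), hoists the planning branch into a guard, folds the five hard-coded gap special cases into one detour lookup table, and collapses the four direction branches into one uniform rule per move axis.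
import Mathlib
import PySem

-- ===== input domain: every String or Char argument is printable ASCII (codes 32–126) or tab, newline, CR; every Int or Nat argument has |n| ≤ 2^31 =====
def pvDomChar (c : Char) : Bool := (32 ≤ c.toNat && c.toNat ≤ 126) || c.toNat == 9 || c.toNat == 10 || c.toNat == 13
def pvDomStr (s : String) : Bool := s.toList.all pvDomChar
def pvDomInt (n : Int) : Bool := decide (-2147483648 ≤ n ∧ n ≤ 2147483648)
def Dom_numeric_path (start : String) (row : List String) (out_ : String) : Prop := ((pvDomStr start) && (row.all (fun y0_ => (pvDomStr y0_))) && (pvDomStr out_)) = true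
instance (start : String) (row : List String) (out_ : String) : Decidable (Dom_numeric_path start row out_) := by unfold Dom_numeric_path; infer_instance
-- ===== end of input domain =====

-- B replaces A's table-driven tail recursion by a while loop over a (start, out) state that
-- computes keypad coordinates arithmetically, folds the gap special cases into one detour
-- lookup table and uses one uniform rule per move axis (objective: alternative).


-- shared transliteration helpers: Python's 1-char-string * n, and `out[-2] if len(out) > 1 else None`
def pvStrRep (c : Char) (n : Nat) : String := String.ofList (List.replicate n c)
def pvLd (out : String) : Option Char := if 1 < PySem.Str.len out then PySem.Str.pyGet? out (-2) else none

-- ===== PORT A =====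
-- NDPL as an association list (all keys distinct; lookup = dict lookup)
def pvNDPL : List (String × (Int × Int)) :=
  [("7",(0,0)),("8",(0,1)),("9",(0,2)),
   ("4",(1,0)),("5",(1,1)),("6",(1,2)),
   ("1",(2,0)),("2",(2,1)),("3",(2,2)),
   ("0",(3,1)),("A",(3,2))]

def pvNDPL_ARR : List (List (Option String)) :=
  [[some "7", some "8", some "9"],
   [some "4", some "5", some "6"],
   [some "1", some "2", some "3"],
   [none, some "0", some "A"]]

-- NDPL_ARR[y][x]: on every input admitted by Pre_ the indices are in range and the entry is a
-- button string (the gap / out-of-range cases, where Python would raise or produce None, yield "?")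
def pvArrGet (y x : Int) : String :=
  (PySem.List.pyGetD (PySem.List.pyGetD pvNDPL_ARR y []) x none).getD "?"

-- literal transliteration of A's tail recursion; fuel 16 is a totality guard only
-- (each recursive call strictly decreases |dy|+|dx| ≤ 5, so fuel is never exhausted on Pre_ inputs)
def numeric_path_go : Nat → String → List String → String → String
  | 0, _, _, _ => ""
  | n+1, start, row, out =>
    match PySem.List.pyGet? row 0 with
    | none => ""          -- IndexError (row empty): outside Pre_
    | some t0 =>
      if start = t0 then out else
      match pvNDPL.lookup start, pvNDPL.lookup t0 with
      | some (ay, ax), some (ey, ex) =>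
        let dy := ey - ay
        let dx := ex - ax
        let leftright : Char := if dx < 0 then '<' else '>'
        let updown : Char := if dy > 0 then 'v' else '^'
        if dy = 0 then out ++ pvStrRep leftright dx.natAbs else
        if dx = 0 then out ++ pvStrRep updown dy.natAbs else
        let ld : Option Char := pvLd out
        if ld = some leftright then
          if ld = some '>' then
            numeric_path_go n (pvArrGet ay (ax + (dx.natAbs : Int))) row (out ++ pvStrRep '>' dx.natAbs)
          else if ld = some '<' then
            (if start = "A" then numeric_path_go n "0" row (out ++ "<")
             else if start = "0" then numeric_path_go n "2" row (out ++ "^")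
             else numeric_path_go n (pvArrGet ay (ax - (dx.natAbs : Int))) row (out ++ pvStrRep '<' dx.natAbs))
          else numeric_path_go n (pvArrGet ay (ax - (dx.natAbs : Int))) row (out ++ pvStrRep '<' dx.natAbs)
        else if ld = some updown then
          if ld = some '^' then
            numeric_path_go n (pvArrGet (ay - (dy.natAbs : Int)) ax) row (out ++ pvStrRep '^' dy.natAbs)
          else if ld = some 'v' then
            (if start = "7" then numeric_path_go n "4" row (out ++ "v")
             else if start = "4" then numeric_path_go n "1" row (out ++ "v")
             else if start = "1" then numeric_path_go n "2" row (out ++ ">")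
             else numeric_path_go n (pvArrGet (ay + (dy.natAbs : Int)) ax) row (out ++ pvStrRep 'v' dy.natAbs))
          else numeric_path_go n (pvArrGet (ay + (dy.natAbs : Int)) ax) row (out ++ pvStrRep 'v' dy.natAbs)
        else
          match PySem.List.pyGet? row 1 with
          | none => ""    -- IndexError (row[1]): outside Pre_
          | some nnum =>
            match pvNDPL.lookup nnum with
            | none => ""  -- KeyError: outside Pre_
            | some (nny, nnx) =>
              let _ndy := nny - ey
              let ndx := nnx - ex
              let nlright : Char := if ndx < 0 then '<' else '>'
              if nlright = leftright then pvStrRep leftright dx.natAbs ++ pvStrRep updown dy.natAbs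
              else if leftright = '<' then pvStrRep '<' dx.natAbs ++ pvStrRep updown dy.natAbs
              else pvStrRep updown dy.natAbs ++ pvStrRep leftright dx.natAbs
      | _, _ => ""        -- KeyError: outside Pre_

def numeric_path (start : String) (row : List String) (out_ : String) : String :=
  numeric_path_go 16 start row out_

-- ===== PORT B =====
-- position of a keypad button, computed arithmetically (no table); ord on a non-1-char
-- string is a Python TypeError (outside Pre_), ported as junk (0,0)
def pvPos (c : String) : Int × Int :=
  if c = "A" then (3, 2)
  else if c = "0" then (3, 1)
  else match c.toList with
    | [ch] =>
      let d : Int := (ch.toNat : Int) - 48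
      (2 - PySem.Int.floordiv (d - 1) 3, PySem.Int.mod (d - 1) 3)
    | _ => (0, 0)

-- inverse of pvPos: the button sitting at (y, x)
def pvBtn (y x : Int) : String :=
  if y = 3 then (if x = 1 then "0" else "A")
  else String.ofList [Char.ofNat (48 + 3 * (2 - y) + x + 1).toNat]

-- the gap detours: (state, last direction) ↦ (next state, the one character to emit)
def pvDetour : List ((String × Option Char) × (String × String)) :=
  [(("A", some '<'), ("0", "<")), (("0", some '<'), ("2", "^")),
   (("7", some 'v'), ("4", "v")), (("4", some 'v'), ("1", "v")), (("1", some 'v'), ("2", ">"))]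

-- one iteration of B's while loop: either a final answer or the next (start, out) state
def pvStep (start : String) (row : List String) (out : String) : Sum String (String × String) :=
  match PySem.List.pyGet? row 0 with
  | none => Sum.inl ""    -- IndexError: outside Pre_
  | some t =>
    if start = t then Sum.inl out else
    let p := pvPos start
    let q := pvPos t
    let dy := q.1 - p.1
    let dx := q.2 - p.2
    let lr : Char := if dx < 0 then '<' else '>'
    let ud : Char := if dy > 0 then 'v' else '^'
    if dy = 0 then Sum.inl (out ++ pvStrRep lr dx.natAbs) else
    if dx = 0 then Sum.inl (out ++ pvStrRep ud dy.natAbs) else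
    if pvLd out ≠ some lr ∧ pvLd out ≠ some ud then
      -- no usable last direction: plan the whole move towards the next number
      match PySem.List.pyGet? row 1 with
      | none => Sum.inl ""  -- IndexError: outside Pre_
      | some nn =>
        let r := pvPos nn
        let first := pvStrRep ud dy.natAbs ++ pvStrRep lr dx.natAbs
        Sum.inl (if (if r.2 - q.2 < 0 then '<' else '>') = lr ∨ lr = '<' then
                   pvStrRep lr dx.natAbs ++ pvStrRep ud dy.natAbs
                 else first)
    else
      match pvDetour.lookup (start, pvLd out) with
      | some d => Sum.inr (d.1, out ++ d.2)
      | none =>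
        if pvLd out = some lr then Sum.inr (pvBtn p.1 q.2, out ++ pvStrRep lr dx.natAbs)
        else Sum.inr (pvBtn q.1 p.2, out ++ pvStrRep ud dy.natAbs)

-- the while loop; fuel 16 is a totality guard only (≤ 6 iterations happen on Pre_ inputs)
def pvLoop : Nat → String → List String → String → String
  | 0, _, _, _ => ""
  | n+1, s, row, out =>
    match pvStep s row out with
    | Sum.inl r => r
    | Sum.inr (s', o') => pvLoop n s' row o'

def numeric_path_alt (start : String) (row : List String) (out_ : String) : String :=
  pvLoop 16 start row out_

-- ===== PRECONDITION & SPEC =====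
def pvKeys : List String := ["7","8","9","4","5","6","1","2","3","0","A"]

-- keypad coordinates, stated independently of both ports (for the precondition only)
def pvKeyPos (c : String) : Int × Int :=
  if c = "7" then (0,0) else if c = "8" then (0,1) else if c = "9" then (0,2)
  else if c = "4" then (1,0) else if c = "5" then (1,1) else if c = "6" then (1,2)
  else if c = "1" then (2,0) else if c = "2" then (2,1) else if c = "3" then (2,2)
  else if c = "0" then (3,1) else (3,2)

-- Python's out[-1] (none only when out is empty)
def pvLast (out : String) : Option Char := PySem.Str.pyGet? out (-1)

-- the recursion takes a gap detour at step 1 and reaches the planning branch at step 2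
def pvD2 (s t : String) (out : String) : Prop :=
  (s = "A" ∧ pvLd out = some '<' ∧ (pvKeyPos t).2 = 0 ∧ pvLast out ≠ some '<' ∧ pvLast out ≠ some '^') ∨
  (s = "0" ∧ pvLd out = some '<' ∧ (pvKeyPos t).1 ≤ 1 ∧ pvLast out ≠ some '<' ∧ pvLast out ≠ some '^') ∨
  (s = "7" ∧ pvLd out = some 'v' ∧ 2 ≤ (pvKeyPos t).1 ∧ pvLast out ≠ some 'v' ∧ pvLast out ≠ some '>') ∨
  (s = "4" ∧ pvLd out = some 'v' ∧ (pvKeyPos t).1 = 3 ∧ pvLast out ≠ some 'v' ∧ pvLast out ≠ some '>') ∨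
  (s = "1" ∧ pvLd out = some 'v' ∧ (pvKeyPos t).1 = 3 ∧ (pvKeyPos t).2 = 2 ∧ pvLast out ≠ some 'v' ∧ pvLast out ≠ some '>')

-- the recursion reaches the planning branch (which reads row[1]): start and row[0] share neither
-- row nor column, and out's last two characters fail to supply a usable direction at step 1
-- (pvLd mismatch) or — after one gap detour — at step 2 (pvD2)
def pvNeedRow1 (s t : String) (out : String) : Prop :=
  ((pvKeyPos s).1 ≠ (pvKeyPos t).1 ∧ (pvKeyPos s).2 ≠ (pvKeyPos t).2) ∧
  ((pvLd out ≠ some (if (pvKeyPos t).2 < (pvKeyPos s).2 then '<' else '>') ∧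
    pvLd out ≠ some (if (pvKeyPos s).1 < (pvKeyPos t).1 then 'v' else '^')) ∨ pvD2 s t out)

-- Pre_ excludes exactly the inputs on which A raises: an empty row (IndexError), a non-button
-- start or row[0] with start ≠ row[0] (KeyError), and — precisely when the recursion reaches the
-- planning branch, characterized by pvNeedRow1 on out's last two characters — a missing or
-- non-button row[1] (IndexError/KeyError).
def Pre_numeric_path (start : String) (row : List String) (out_ : String) : Prop :=
  row ≠ [] ∧ (start = row.headD "" ∨
    (start ∈ pvKeys ∧ row.headD "" ∈ pvKeys ∧
      (pvNeedRow1 start (row.headD "") out_ → 2 ≤ row.length ∧ row.getD 1 "" ∈ pvKeys)))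
instance (start : String) (row : List String) (out_ : String) : Decidable (Pre_numeric_path start row out_) := by unfold Pre_numeric_path pvNeedRow1 pvD2; infer_instance

def pvWitness_numeric_path : String × List String × String := ("A", ["7", "8"], "")

def Spec_numeric_path (start : String) (row : List String) (out_ : String) (out : String) : Prop := out = numeric_path_alt start row out_
instance (start : String) (row : List String) (out_ : String) (out : String) : Decidable (Spec_numeric_path start row out_ out) := by unfold Spec_numeric_path; infer_instance

-- ===== CLAIM (what is proved, stated in full; the proofs are below) =====
def Claim_equal_numeric_path : Prop := ∀ (start : String) (row : List String) (out_ : String), Dom_numeric_path start row out_ → Pre_numeric_path start row out_ → Spec_numeric_path start row out_ (numeric_path start row out_)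

-- ===== LEMMAS AND PROOFS =====

-- the dict lookup, the arithmetic position and the precondition's table agree on the 11 buttons
lemma pv_lookup_eq : ∀ s, s ∈ pvKeys → pvNDPL.lookup s = some (pvPos s) := by
  intro s hs; fin_cases hs <;> rfl

lemma pv_keyPos_eq : ∀ s, s ∈ pvKeys → pvKeyPos s = pvPos s := by
  intro s hs; fin_cases hs <;> rfl

lemma pv_pos_bounds : ∀ s, s ∈ pvKeys →
    0 ≤ (pvPos s).1 ∧ (pvPos s).1 ≤ 3 ∧ 0 ≤ (pvPos s).2 ∧ (pvPos s).2 ≤ 2 := by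
  intro s hs; fin_cases hs <;> decide

-- List.lookup through one cons, stated with propositional equality
lemma pv_lookup_cons {α β : Type} [BEq α] [LawfulBEq α] [DecidableEq α] (a k : α) (v : β)
    (l : List (α × β)) :
    List.lookup a ((k, v) :: l) = if a = k then some v else List.lookup a l := by
  by_cases h : a = k
  · subst h; simp [List.lookup]
  · simp only [List.lookup]
    rw [show (a == k) = false by simp [h]]
    simp [h]

-- the detour table, resolved for an abstract state
lemma pv_look_lt (s : String) :
    pvDetour.lookup (s, (some '<' : Option Char)) =
      if s = "A" then some ("0", "<") else if s = "0" then some ("2", "^") else none := by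
  by_cases h1 : s = "A" <;> by_cases h2 : s = "0" <;>
    simp_all [pvDetour, pv_lookup_cons, Prod.ext_iff]

lemma pv_look_v (s : String) :
    pvDetour.lookup (s, (some 'v' : Option Char)) =
      if s = "7" then some ("4", "v") else if s = "4" then some ("1", "v")
      else if s = "1" then some ("2", ">") else none := by
  by_cases h1 : s = "7" <;> by_cases h2 : s = "4" <;> by_cases h3 : s = "1" <;>
    simp_all [pvDetour, pv_lookup_cons, Prod.ext_iff]

lemma pv_look_gt (s : String) : pvDetour.lookup (s, (some '>' : Option Char)) = none := by
  simp [pvDetour, pv_lookup_cons, Prod.ext_iff]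

lemma pv_look_up (s : String) : pvDetour.lookup (s, (some '^' : Option Char)) = none := by
  simp [pvDetour, pv_lookup_cons, Prod.ext_iff]

-- reading the last two characters through a single-character append
lemma pvLd_some_ne {out : String} {c : Char} (h : pvLd out = some c) :
    out.toList ≠ [] := by
  intro hnil
  rw [pvLd, if_neg (by simp [PySem.Str.len_eq, hnil])] at h
  simp at h

lemma pvLast_app (out x : String) (c : Char) (hx : x.toList = [c]) :
    pvLast (out ++ x) = some c := by
  simp [pvLast, PySem.Str.pyGet?_eq, hx]

lemma pvLd_app (out x : String) (c : Char) (hx : x.toList = [c]) (h : out.toList ≠ []) :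
    pvLd (out ++ x) = pvLast out := by
  have hl : (out ++ x).toList = out.toList ++ [c] := by simp [hx]
  have hlen : 0 < out.toList.length := List.length_pos_iff.mpr h
  have h2 : 1 < PySem.Str.len (out ++ x) := by
    rw [PySem.Str.len_append, PySem.Str.len_eq, PySem.Str.len_eq, hx]
    simp only [List.length_cons, List.length_nil]
    omega
  rw [pvLd, if_pos h2, pvLast]
  simp only [PySem.Str.pyGet?_eq, PySem.Chars.pyGet?_eq_listPyGet?, hl]
  rw [PySem.List.pyGet?_neg_ofNat (out.toList ++ [c]) 2 (by omega)
    (by simp only [List.length_append, List.length_cons, List.length_nil]; omega)]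
  rw [PySem.List.pyGet?_neg_ofNat out.toList 1 (by omega) (by omega)]
  rw [List.getElem?_append_left (by simp only [List.length_append, List.length_cons, List.length_nil]; omega)]
  congr 1
  simp only [List.length_append, List.length_cons, List.length_nil]
  omega

-- full horizontal move to the right: table lookup = arithmetic inverse, it lands on a button,
-- and the landing button shares row[0]'s column
lemma pv_right_eq : ∀ s, s ∈ pvKeys → ∀ t, t ∈ pvKeys →
    0 < (pvPos t).2 - (pvPos s).2 →
    pvArrGet (pvPos s).1 ((pvPos s).2 + (((pvPos t).2 - (pvPos s).2).natAbs : Int)) = pvBtn (pvPos s).1 (pvPos t).2 ∧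
    pvBtn (pvPos s).1 (pvPos t).2 ∈ pvKeys ∧
    (pvPos (pvBtn (pvPos s).1 (pvPos t).2)).2 = (pvPos t).2 := by
  intro s hs t ht; fin_cases hs <;> fin_cases ht <;> decide

-- full horizontal move to the left (start is not on the bottom row)
lemma pv_left_eq : ∀ s, s ∈ pvKeys → ∀ t, t ∈ pvKeys → s ≠ "A" → s ≠ "0" →
    (pvPos t).2 - (pvPos s).2 < 0 →
    pvArrGet (pvPos s).1 ((pvPos s).2 - (((pvPos t).2 - (pvPos s).2).natAbs : Int)) = pvBtn (pvPos s).1 (pvPos t).2 ∧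
    pvBtn (pvPos s).1 (pvPos t).2 ∈ pvKeys ∧
    (pvPos (pvBtn (pvPos s).1 (pvPos t).2)).2 = (pvPos t).2 := by
  intro s hs t ht; fin_cases hs <;> fin_cases ht <;> decide

-- full vertical move up
lemma pv_up_eq : ∀ s, s ∈ pvKeys → ∀ t, t ∈ pvKeys →
    (pvPos t).1 - (pvPos s).1 < 0 →
    pvArrGet ((pvPos s).1 - (((pvPos t).1 - (pvPos s).1).natAbs : Int)) (pvPos s).2 = pvBtn (pvPos t).1 (pvPos s).2 ∧
    pvBtn (pvPos t).1 (pvPos s).2 ∈ pvKeys ∧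
    (pvPos (pvBtn (pvPos t).1 (pvPos s).2)).1 = (pvPos t).1 := by
  intro s hs t ht; fin_cases hs <;> fin_cases ht <;> decide

-- full vertical move down (start is not in the left column)
lemma pv_down_eq : ∀ s, s ∈ pvKeys → ∀ t, t ∈ pvKeys → s ≠ "7" → s ≠ "4" → s ≠ "1" →
    0 < (pvPos t).1 - (pvPos s).1 →
    pvArrGet ((pvPos s).1 + (((pvPos t).1 - (pvPos s).1).natAbs : Int)) (pvPos s).2 = pvBtn (pvPos t).1 (pvPos s).2 ∧
    pvBtn (pvPos t).1 (pvPos s).2 ∈ pvKeys ∧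
    (pvPos (pvBtn (pvPos t).1 (pvPos s).2)).1 = (pvPos t).1 := by
  intro s hs t ht; fin_cases hs <;> fin_cases ht <;> decide

-- one aligned (or arrived) state: both programs return at once, with the same value
lemma pv_aligned_eq (n : Nat) (s t : String) (rest : List String) (out : String)
    (hs : s ∈ pvKeys) (ht : t ∈ pvKeys)
    (hal : (pvPos s).1 = (pvPos t).1 ∨ (pvPos s).2 = (pvPos t).2) :
    numeric_path_go n s (t :: rest) out = pvLoop n s (t :: rest) out := by
  cases n with
  | zero => rfl
  | succ n =>
    by_cases hst : s = t
    · subst hst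
      simp [numeric_path_go, pvLoop, pvStep, PySem.List.pyGet?_zero_cons]
    · simp only [numeric_path_go, pvLoop, pvStep, PySem.List.pyGet?_zero_cons,
        pv_lookup_eq s hs, pv_lookup_eq t ht]
      rcases hps : pvPos s with ⟨ay, ax⟩
      rcases hpt : pvPos t with ⟨ey, ex⟩
      rw [hps, hpt] at hal
      simp only [hps, hpt, if_neg hst]
      rcases hal with h | h
      · subst h
        simp
      · subst h
        by_cases hdy : ey - ay = 0 <;> simp [hdy]

-- with the target and the planned second target being buttons, A's recursion and B's loop
-- agree from every button state, for equal fuel (covers the planning branch)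
lemma pv_loop_eq (t t1 : String) (rest : List String) (ht : t ∈ pvKeys) (ht1 : t1 ∈ pvKeys) :
    ∀ n s out, s ∈ pvKeys →
      numeric_path_go n s (t :: t1 :: rest) out = pvLoop n s (t :: t1 :: rest) out := by
  intro n
  induction n with
  | zero => intro s out _; rfl
  | succ n ih =>
    intro s out hs
    by_cases hal : (pvPos s).1 = (pvPos t).1 ∨ (pvPos s).2 = (pvPos t).2
    · exact pv_aligned_eq (n+1) s t (t1 :: rest) out hs ht hal
    · obtain ⟨hy, hx⟩ := not_or.mp hal
      have hst : s ≠ t := by rintro rfl; exact hy rfl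
      have hq1 : PySem.List.pyGet? (t :: t1 :: rest) 1 = some t1 := by
        simp [pysem]
      simp only [numeric_path_go, pvLoop, pvStep, PySem.List.pyGet?_zero_cons,
        pv_lookup_eq s hs, pv_lookup_eq t ht, hq1, pv_lookup_eq t1 ht1]
      have hright := pv_right_eq s hs t ht
      have hleft := pv_left_eq s hs t ht
      have hup := pv_up_eq s hs t ht
      have hdown := pv_down_eq s hs t ht
      rcases hps : pvPos s with ⟨ay, ax⟩
      rcases hpt : pvPos t with ⟨ey, ex⟩
      rcases hpt1 : pvPos t1 with ⟨ny, nx⟩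
      rw [hps, hpt] at hy hx hright hleft hup hdown
      simp only [hps, hpt, hpt1, if_neg hst]
      have hdy : ¬ (ey - ay = 0) := fun h => hy (by omega)
      have hdx : ¬ (ex - ax = 0) := fun h => hx (by omega)
      simp only [if_neg hdy, if_neg hdx]
      dsimp only at hleft hright hup hdown
      by_cases hdxn : ex - ax < 0 <;> by_cases hdyn : 0 < ey - ay <;>
        simp only [hdxn, hdyn, ite_true, ite_false, if_true, if_false]
      · -- lr = '<', ud = 'v'
        by_cases h1 : pvLd out = some '<'
        · rw [h1]
          simp only [reduceIte, ne_eq, Option.some.injEq, Char.reduceEq, not_false_eq_true,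
            not_true_eq_false, false_and, and_false, true_and, and_true, if_true, if_false,
            pv_look_lt s]
          by_cases hsA : s = "A"
          · simp only [hsA, if_true, reduceIte]
            exact ih _ _ (by decide)
          · by_cases hs0 : s = "0"
            · simp only [hsA, hs0, if_true, if_false, reduceIte]
              exact ih _ _ (by decide)
            · obtain ⟨harr, hkey, _⟩ := hleft hsA hs0 hdxn
              simp only [hsA, hs0, if_false, reduceIte, harr]
              exact ih _ _ hkey
        · by_cases h2 : pvLd out = some 'v'
          · rw [h2]
            simp only [reduceIte, ne_eq, Option.some.injEq, Char.reduceEq, not_false_eq_true,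
              not_true_eq_false, false_and, and_false, true_and, and_true, if_true, if_false,
              pv_look_v s]
            by_cases hs7 : s = "7"
            · simp only [hs7, if_true, reduceIte]
              exact ih _ _ (by decide)
            · by_cases hs4 : s = "4"
              · simp only [hs7, hs4, if_true, if_false, reduceIte]
                exact ih _ _ (by decide)
              · by_cases hsO : s = "1"
                · simp only [hs7, hs4, hsO, if_true, if_false, reduceIte]
                  exact ih _ _ (by decide)
                · obtain ⟨harr, hkey, _⟩ := hdown hs7 hs4 hsO hdyn
                  simp only [hs7, hs4, hsO, if_false, reduceIte, harr]
                  exact ih _ _ hkey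
          · rw [if_pos (show pvLd out ≠ some '<' ∧ pvLd out ≠ some 'v' from ⟨h1, h2⟩)]
            simp only [h1, h2, reduceIte, if_false]
            by_cases hnl : (if nx - ex < 0 then '<' else '>') = '<' <;> simp [hnl]
      · -- lr = '<', ud = '^'
        by_cases h1 : pvLd out = some '<'
        · rw [h1]
          simp only [reduceIte, ne_eq, Option.some.injEq, Char.reduceEq, not_false_eq_true,
            not_true_eq_false, false_and, and_false, true_and, and_true, if_true, if_false,
            pv_look_lt s]
          by_cases hsA : s = "A"
          · simp only [hsA, if_true, reduceIte]
            exact ih _ _ (by decide)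
          · by_cases hs0 : s = "0"
            · simp only [hsA, hs0, if_true, if_false, reduceIte]
              exact ih _ _ (by decide)
            · obtain ⟨harr, hkey, _⟩ := hleft hsA hs0 hdxn
              simp only [hsA, hs0, if_false, reduceIte, harr]
              exact ih _ _ hkey
        · by_cases h2 : pvLd out = some '^'
          · rw [h2]
            have hyp : ey - ay < 0 := by omega
            obtain ⟨harr, hkey, _⟩ := hup hyp
            simp only [reduceIte, ne_eq, Option.some.injEq, Char.reduceEq, not_false_eq_true,
              not_true_eq_false, false_and, and_false, true_and, and_true, if_true, if_false,
              pv_look_up s, harr]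
            exact ih _ _ hkey
          · rw [if_pos (show pvLd out ≠ some '<' ∧ pvLd out ≠ some '^' from ⟨h1, h2⟩)]
            simp only [h1, h2, reduceIte, if_false]
            by_cases hnl : (if nx - ex < 0 then '<' else '>') = '<' <;> simp [hnl]
      · -- lr = '>', ud = 'v'
        by_cases h1 : pvLd out = some '>'
        · rw [h1]
          have hxp : 0 < ex - ax := by omega
          obtain ⟨harr, hkey, _⟩ := hright hxp
          simp only [reduceIte, ne_eq, Option.some.injEq, Char.reduceEq, not_false_eq_true,
            not_true_eq_false, false_and, and_false, true_and, and_true, if_true, if_false,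
            pv_look_gt s, harr]
          exact ih _ _ hkey
        · by_cases h2 : pvLd out = some 'v'
          · rw [h2]
            simp only [reduceIte, ne_eq, Option.some.injEq, Char.reduceEq, not_false_eq_true,
              not_true_eq_false, false_and, and_false, true_and, and_true, if_true, if_false,
              pv_look_v s]
            by_cases hs7 : s = "7"
            · simp only [hs7, if_true, reduceIte]
              exact ih _ _ (by decide)
            · by_cases hs4 : s = "4"
              · simp only [hs7, hs4, if_true, if_false, reduceIte]
                exact ih _ _ (by decide)
              · by_cases hsO : s = "1"
                · simp only [hs7, hs4, hsO, if_true, if_false, reduceIte]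
                  exact ih _ _ (by decide)
                · obtain ⟨harr, hkey, _⟩ := hdown hs7 hs4 hsO hdyn
                  simp only [hs7, hs4, hsO, if_false, reduceIte, harr]
                  exact ih _ _ hkey
          · rw [if_pos (show pvLd out ≠ some '>' ∧ pvLd out ≠ some 'v' from ⟨h1, h2⟩)]
            simp only [h1, h2, reduceIte, if_false]
            by_cases hnl : (if nx - ex < 0 then '<' else '>') = '>' <;> simp [hnl]
      · -- lr = '>', ud = '^'
        by_cases h1 : pvLd out = some '>'
        · rw [h1]
          have hxp : 0 < ex - ax := by omega
          obtain ⟨harr, hkey, _⟩ := hright hxp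
          simp only [reduceIte, ne_eq, Option.some.injEq, Char.reduceEq, not_false_eq_true,
            not_true_eq_false, false_and, and_false, true_and, and_true, if_true, if_false,
            pv_look_gt s, harr]
          exact ih _ _ hkey
        · by_cases h2 : pvLd out = some '^'
          · rw [h2]
            have hyp : ey - ay < 0 := by omega
            obtain ⟨harr, hkey, _⟩ := hup hyp
            simp only [reduceIte, ne_eq, Option.some.injEq, Char.reduceEq, not_false_eq_true,
              not_true_eq_false, false_and, and_false, true_and, and_true, if_true, if_false,
              pv_look_up s, harr]
            exact ih _ _ hkey
          · rw [if_pos (show pvLd out ≠ some '>' ∧ pvLd out ≠ some '^' from ⟨h1, h2⟩)]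
            simp only [h1, h2, reduceIte, if_false]
            by_cases hnl : (if nx - ex < 0 then '<' else '>') = '>' <;> simp [hnl]

-- from a diagonal state whose last direction is usable and whose detour (if any) stays usable,
-- A's recursion and B's loop agree for equal fuel, without ever reading row[1]
lemma pv_noplan_eq (t : String) (rest : List String) (ht : t ∈ pvKeys) :
    ∀ n s out, s ∈ pvKeys →
      (pvPos s).1 ≠ (pvPos t).1 → (pvPos s).2 ≠ (pvPos t).2 →
      (pvLd out = some (if (pvPos t).2 - (pvPos s).2 < 0 then '<' else '>') ∨
       pvLd out = some (if 0 < (pvPos t).1 - (pvPos s).1 then 'v' else '^')) →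
      ¬ pvD2 s t out →
      numeric_path_go n s (t :: rest) out = pvLoop n s (t :: rest) out := by
  intro n
  induction n with
  | zero => intro s out _ _ _ _ _; rfl
  | succ n ih =>
    intro s out hs hy hx hld hnD2
    have hst : s ≠ t := by rintro rfl; exact hy rfl
    have htb := pv_pos_bounds t ht
    simp only [pvD2, pv_keyPos_eq t ht] at hnD2
    simp only [numeric_path_go, pvLoop, pvStep, PySem.List.pyGet?_zero_cons,
      pv_lookup_eq s hs, pv_lookup_eq t ht]
    have hright := pv_right_eq s hs t ht
    have hleft := pv_left_eq s hs t ht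
    have hup := pv_up_eq s hs t ht
    have hdown := pv_down_eq s hs t ht
    rcases hps : pvPos s with ⟨ay, ax⟩
    rcases hpt : pvPos t with ⟨ey, ex⟩
    rw [hps, hpt] at hy hx hld hright hleft hup hdown
    rw [hpt] at hnD2 htb
    simp only [hps, hpt, if_neg hst]
    have hdy : ¬ (ey - ay = 0) := fun h => hy (by omega)
    have hdx : ¬ (ex - ax = 0) := fun h => hx (by omega)
    simp only [if_neg hdy, if_neg hdx]
    dsimp only at hleft hright hup hdown hnD2 htb hy hx hld
    obtain ⟨hey0, hey3, hex0, hex2⟩ := htb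
    by_cases hdxn : ex - ax < 0 <;> by_cases hdyn : 0 < ey - ay <;>
      simp only [hdxn, hdyn, ite_true, ite_false, if_true, if_false] at hld ⊢
    · -- lr = '<', ud = 'v'
      rcases hld with h1 | h1
      · -- last direction '<'; the detours 'A'/'0' are impossible here (they sit on row 3)
        rw [h1]
        simp only [reduceIte, ne_eq, Option.some.injEq, Char.reduceEq, not_false_eq_true,
          not_true_eq_false, false_and, and_false, true_and, and_true, if_true, if_false,
          pv_look_lt s]
        by_cases hsA : s = "A"
        · exfalso
          subst hsA
          rw [show pvPos "A" = ((3:Int), (2:Int)) from by decide] at hps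
          injection hps with e1 e2
          omega
        · by_cases hs0 : s = "0"
          · exfalso
            subst hs0
            rw [show pvPos "0" = ((3:Int), (1:Int)) from by decide] at hps
            injection hps with e1 e2
            omega
          · obtain ⟨harr, hkey, halc⟩ := hleft hsA hs0 hdxn
            simp only [hsA, hs0, if_false, reduceIte, harr]
            exact pv_aligned_eq n _ t rest _ hkey ht (Or.inr (by rw [hpt]; exact halc))
      · -- last direction 'v'; the detours '7'/'4'/'1' are impossible here (they sit in column 0)
        rw [h1]
        simp only [reduceIte, ne_eq, Option.some.injEq, Char.reduceEq, not_false_eq_true,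
          not_true_eq_false, false_and, and_false, true_and, and_true, if_true, if_false,
          pv_look_v s]
        by_cases hs7 : s = "7"
        · exfalso
          subst hs7
          rw [show pvPos "7" = ((0:Int), (0:Int)) from by decide] at hps
          injection hps with e1 e2
          omega
        · by_cases hs4 : s = "4"
          · exfalso
            subst hs4
            rw [show pvPos "4" = ((1:Int), (0:Int)) from by decide] at hps
            injection hps with e1 e2
            omega
          · by_cases hsO : s = "1"
            · exfalso
              subst hsO
              rw [show pvPos "1" = ((2:Int), (0:Int)) from by decide] at hps
              injection hps with e1 e2
              omega
            · obtain ⟨harr, hkey, halr⟩ := hdown hs7 hs4 hsO hdyn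
              simp only [hs7, hs4, hsO, if_false, reduceIte, harr]
              exact pv_aligned_eq n _ t rest _ hkey ht (Or.inl (by rw [hpt]; exact halr))
    · -- lr = '<', ud = '^'
      rcases hld with h1 | h1
      · -- last direction '<': the 'A' and '0' detours are live
        rw [h1]
        simp only [reduceIte, ne_eq, Option.some.injEq, Char.reduceEq, not_false_eq_true,
          not_true_eq_false, false_and, and_false, true_and, and_true, if_true, if_false,
          pv_look_lt s]
        have hne : out.toList ≠ [] := pvLd_some_ne h1
        by_cases hsA : s = "A"
        · subst hsA
          rw [show pvPos "A" = ((3:Int), (2:Int)) from by decide] at hps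
          injection hps with e1 e2
          subst e1; subst e2
          simp only [String.reduceEq, reduceIte, if_true, if_false]
          by_cases hex : ex = 1
          · exact pv_aligned_eq n "0" t rest _ (by decide) ht (Or.inr (by
              rw [hpt, show pvPos "0" = ((3:Int), (1:Int)) from by decide]; dsimp only; omega))
          · have hex0' : ex = 0 := by omega
            have hlast : pvLast out = some '<' ∨ pvLast out = some '^' := by
              by_contra hcon
              push_neg at hcon
              exact hnD2 (Or.inl ⟨rfl, h1, by omega, hcon.1, hcon.2⟩)
            have hld' : pvLd (out ++ "<") = pvLast out := pvLd_app out "<" '<' (by decide) hne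
            refine ih "0" (out ++ "<") (by decide) ?_ ?_ ?_ ?_
            · rw [hpt, show pvPos "0" = ((3:Int), (1:Int)) from by decide]; dsimp only; omega
            · rw [hpt, show pvPos "0" = ((3:Int), (1:Int)) from by decide]; dsimp only; omega
            · rw [hpt, show pvPos "0" = ((3:Int), (1:Int)) from by decide]
              dsimp only
              rcases hlast with hl | hl
              · exact Or.inl (by rw [if_pos (by omega), hld', hl])
              · exact Or.inr (by rw [if_neg (by omega), hld', hl])
            · simp [pvD2, pvLast_app out "<" '<' (by decide)]
        · by_cases hs0 : s = "0"
          · subst hs0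
            rw [show pvPos "0" = ((3:Int), (1:Int)) from by decide] at hps
            injection hps with e1 e2
            subst e1; subst e2
            simp only [String.reduceEq, reduceIte, if_true, if_false]
            have hex0' : ex = 0 := by omega
            by_cases hey : ey = 2
            · exact pv_aligned_eq n "2" t rest _ (by decide) ht (Or.inl (by
                rw [hpt, show pvPos "2" = ((2:Int), (1:Int)) from by decide]; dsimp only; omega))
            · have hlast : pvLast out = some '<' ∨ pvLast out = some '^' := by
                by_contra hcon
                push_neg at hcon
                exact hnD2 (Or.inr (Or.inl ⟨rfl, h1, by omega, hcon.1, hcon.2⟩))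
              have hld' : pvLd (out ++ "^") = pvLast out := pvLd_app out "^" '^' (by decide) hne
              refine ih "2" (out ++ "^") (by decide) ?_ ?_ ?_ ?_
              · rw [hpt, show pvPos "2" = ((2:Int), (1:Int)) from by decide]; dsimp only; omega
              · rw [hpt, show pvPos "2" = ((2:Int), (1:Int)) from by decide]; dsimp only; omega
              · rw [hpt, show pvPos "2" = ((2:Int), (1:Int)) from by decide]
                dsimp only
                rcases hlast with hl | hl
                · exact Or.inl (by rw [if_pos (by omega), hld', hl])
                · exact Or.inr (by rw [if_neg (by omega), hld', hl])
              · simp [pvD2, pvLast_app out "^" '^' (by decide)]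
          · obtain ⟨harr, hkey, halc⟩ := hleft hsA hs0 hdxn
            simp only [hsA, hs0, if_false, reduceIte, harr]
            exact pv_aligned_eq n _ t rest _ hkey ht (Or.inr (by rw [hpt]; exact halc))
      · -- last direction '^': a plain full vertical move
        rw [h1]
        have hyp : ey - ay < 0 := by omega
        obtain ⟨harr, hkey, halr⟩ := hup hyp
        simp only [reduceIte, ne_eq, Option.some.injEq, Char.reduceEq, not_false_eq_true,
          not_true_eq_false, false_and, and_false, true_and, and_true, if_true, if_false,
          pv_look_up s, harr]
        exact pv_aligned_eq n _ t rest _ hkey ht (Or.inl (by rw [hpt]; exact halr))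
    · -- lr = '>', ud = 'v'
      rcases hld with h1 | h1
      · -- last direction '>': a plain full horizontal move
        rw [h1]
        have hxp : 0 < ex - ax := by omega
        obtain ⟨harr, hkey, halc⟩ := hright hxp
        simp only [reduceIte, ne_eq, Option.some.injEq, Char.reduceEq, not_false_eq_true,
          not_true_eq_false, false_and, and_false, true_and, and_true, if_true, if_false,
          pv_look_gt s, harr]
        exact pv_aligned_eq n _ t rest _ hkey ht (Or.inr (by rw [hpt]; exact halc))
      · -- last direction 'v': the '7'/'4'/'1' detours are live
        rw [h1]
        simp only [reduceIte, ne_eq, Option.some.injEq, Char.reduceEq, not_false_eq_true,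
          not_true_eq_false, false_and, and_false, true_and, and_true, if_true, if_false,
          pv_look_v s]
        have hne : out.toList ≠ [] := pvLd_some_ne h1
        by_cases hs7 : s = "7"
        · subst hs7
          rw [show pvPos "7" = ((0:Int), (0:Int)) from by decide] at hps
          injection hps with e1 e2
          subst e1; subst e2
          simp only [String.reduceEq, reduceIte, if_true, if_false]
          by_cases hey : ey = 1
          · exact pv_aligned_eq n "4" t rest _ (by decide) ht (Or.inl (by
              rw [hpt, show pvPos "4" = ((1:Int), (0:Int)) from by decide]; dsimp only; omega))
          · have hlast : pvLast out = some 'v' ∨ pvLast out = some '>' := by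
              by_contra hcon
              push_neg at hcon
              exact hnD2 (Or.inr (Or.inr (Or.inl ⟨rfl, h1, by omega, hcon.1, hcon.2⟩)))
            have hld' : pvLd (out ++ "v") = pvLast out := pvLd_app out "v" 'v' (by decide) hne
            refine ih "4" (out ++ "v") (by decide) ?_ ?_ ?_ ?_
            · rw [hpt, show pvPos "4" = ((1:Int), (0:Int)) from by decide]; dsimp only; omega
            · rw [hpt, show pvPos "4" = ((1:Int), (0:Int)) from by decide]; dsimp only; omega
            · rw [hpt, show pvPos "4" = ((1:Int), (0:Int)) from by decide]
              dsimp only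
              rcases hlast with hl | hl
              · exact Or.inr (by rw [if_pos (by omega), hld', hl])
              · exact Or.inl (by rw [if_neg (by omega), hld', hl])
            · simp [pvD2, pvLast_app out "v" 'v' (by decide)]
        · by_cases hs4 : s = "4"
          · subst hs4
            rw [show pvPos "4" = ((1:Int), (0:Int)) from by decide] at hps
            injection hps with e1 e2
            subst e1; subst e2
            simp only [String.reduceEq, reduceIte, if_true, if_false]
            by_cases hey : ey = 2
            · exact pv_aligned_eq n "1" t rest _ (by decide) ht (Or.inl (by
                rw [hpt, show pvPos "1" = ((2:Int), (0:Int)) from by decide]; dsimp only; omega))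
            · have hey3' : ey = 3 := by omega
              have hlast : pvLast out = some 'v' ∨ pvLast out = some '>' := by
                by_contra hcon
                push_neg at hcon
                exact hnD2 (Or.inr (Or.inr (Or.inr (Or.inl ⟨rfl, h1, by omega, hcon.1, hcon.2⟩))))
              have hld' : pvLd (out ++ "v") = pvLast out := pvLd_app out "v" 'v' (by decide) hne
              refine ih "1" (out ++ "v") (by decide) ?_ ?_ ?_ ?_
              · rw [hpt, show pvPos "1" = ((2:Int), (0:Int)) from by decide]; dsimp only; omega
              · rw [hpt, show pvPos "1" = ((2:Int), (0:Int)) from by decide]; dsimp only; omega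
              · rw [hpt, show pvPos "1" = ((2:Int), (0:Int)) from by decide]
                dsimp only
                rcases hlast with hl | hl
                · exact Or.inr (by rw [if_pos (by omega), hld', hl])
                · exact Or.inl (by rw [if_neg (by omega), hld', hl])
              · simp [pvD2, pvLast_app out "v" 'v' (by decide)]
          · by_cases hsO : s = "1"
            · subst hsO
              rw [show pvPos "1" = ((2:Int), (0:Int)) from by decide] at hps
              injection hps with e1 e2
              subst e1; subst e2
              simp only [String.reduceEq, reduceIte, if_true, if_false]
              by_cases hex : ex = 1
              · exact pv_aligned_eq n "2" t rest _ (by decide) ht (Or.inr (by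
                  rw [hpt, show pvPos "2" = ((2:Int), (1:Int)) from by decide]; dsimp only; omega))
              · have hex2' : ex = 2 := by omega
                have hey3' : ey = 3 := by omega
                have hlast : pvLast out = some 'v' ∨ pvLast out = some '>' := by
                  by_contra hcon
                  push_neg at hcon
                  exact hnD2 (Or.inr (Or.inr (Or.inr (Or.inr
                    ⟨rfl, h1, by omega, by omega, hcon.1, hcon.2⟩))))
                have hld' : pvLd (out ++ ">") = pvLast out := pvLd_app out ">" '>' (by decide) hne
                refine ih "2" (out ++ ">") (by decide) ?_ ?_ ?_ ?_
                · rw [hpt, show pvPos "2" = ((2:Int), (1:Int)) from by decide]; dsimp only; omega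
                · rw [hpt, show pvPos "2" = ((2:Int), (1:Int)) from by decide]; dsimp only; omega
                · rw [hpt, show pvPos "2" = ((2:Int), (1:Int)) from by decide]
                  dsimp only
                  rcases hlast with hl | hl
                  · exact Or.inr (by rw [if_pos (by omega), hld', hl])
                  · exact Or.inl (by rw [if_neg (by omega), hld', hl])
                · simp [pvD2, pvLast_app out ">" '>' (by decide)]
            · obtain ⟨harr, hkey, halr⟩ := hdown hs7 hs4 hsO hdyn
              simp only [hs7, hs4, hsO, if_false, reduceIte, harr]
              exact pv_aligned_eq n _ t rest _ hkey ht (Or.inl (by rw [hpt]; exact halr))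
    · -- lr = '>', ud = '^': both directions are plain full moves
      rcases hld with h1 | h1
      · rw [h1]
        have hxp : 0 < ex - ax := by omega
        obtain ⟨harr, hkey, halc⟩ := hright hxp
        simp only [reduceIte, ne_eq, Option.some.injEq, Char.reduceEq, not_false_eq_true,
          not_true_eq_false, false_and, and_false, true_and, and_true, if_true, if_false,
          pv_look_gt s, harr]
        exact pv_aligned_eq n _ t rest _ hkey ht (Or.inr (by rw [hpt]; exact halc))
      · rw [h1]
        have hyp : ey - ay < 0 := by omega
        obtain ⟨harr, hkey, halr⟩ := hup hyp
        simp only [reduceIte, ne_eq, Option.some.injEq, Char.reduceEq, not_false_eq_true,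
          not_true_eq_false, false_and, and_false, true_and, and_true, if_true, if_false,
          pv_look_up s, harr]
        exact pv_aligned_eq n _ t rest _ hkey ht (Or.inl (by rw [hpt]; exact halr))

-- ===== VERDICT (by name: the statement is the Claim_ definition above) =====
theorem numeric_path_spec : Claim_equal_numeric_path := by
  unfold Claim_equal_numeric_path
  intro start row out_ _ hpre
  unfold Spec_numeric_path numeric_path numeric_path_alt
  obtain ⟨hne, hpre⟩ := hpre
  cases row with
  | nil => exact absurd rfl hne
  | cons t rest =>
    simp only [List.headD_cons] at hpre
    rcases hpre with heq | ⟨hs, ht, himp⟩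
    · subst heq
      simp [numeric_path_go, pvLoop, pvStep, PySem.List.pyGet?_zero_cons]
    · simp only [List.getD_cons_succ] at himp
      by_cases hal : (pvPos start).1 = (pvPos t).1 ∨ (pvPos start).2 = (pvPos t).2
      · exact pv_aligned_eq 16 start t rest out_ hs ht hal
      · obtain ⟨hy, hx⟩ := not_or.mp hal
        have hdiag : (pvKeyPos start).1 ≠ (pvKeyPos t).1 ∧ (pvKeyPos start).2 ≠ (pvKeyPos t).2 := by
          rw [pv_keyPos_eq start hs, pv_keyPos_eq t ht]; exact ⟨hy, hx⟩
        by_cases hld : pvLd out_ = some (if (pvPos t).2 - (pvPos start).2 < 0 then '<' else '>') ∨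
            pvLd out_ = some (if 0 < (pvPos t).1 - (pvPos start).1 then 'v' else '^')
        · by_cases hD2 : pvD2 start t out_
          · have hneed : pvNeedRow1 start t out_ := ⟨hdiag, Or.inr hD2⟩
            obtain ⟨hlen, h1⟩ := himp hneed
            cases rest with
            | nil => simp at hlen
            | cons t1 rest' =>
              simp only [List.getD_cons_zero] at h1
              exact pv_loop_eq t t1 rest' ht h1 16 start out_ hs
          · exact pv_noplan_eq t rest ht 16 start out_ hs hy hx hld hD2
        · have hneed : pvNeedRow1 start t out_ := by
            refine ⟨hdiag, Or.inl ?_⟩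
            rw [pv_keyPos_eq start hs, pv_keyPos_eq t ht]
            have hno := not_or.mp hld
            constructor
            · rw [show (if (pvPos t).2 < (pvPos start).2 then '<' else '>')
                  = (if (pvPos t).2 - (pvPos start).2 < 0 then '<' else '>') by
                by_cases hc : (pvPos t).2 - (pvPos start).2 < 0
                · rw [if_pos hc, if_pos (by omega)]
                · rw [if_neg hc, if_neg (by omega)]]
              exact hno.1
            · rw [show (if (pvPos start).1 < (pvPos t).1 then 'v' else '^')
                  = (if 0 < (pvPos t).1 - (pvPos start).1 then 'v' else '^') by
                by_cases hc : 0 < (pvPos t).1 - (pvPos start).1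
                · rw [if_pos hc, if_pos (by omega)]
                · rw [if_neg hc, if_neg (by omega)]]
              exact hno.2
          obtain ⟨hlen, h1⟩ := himp hneed
          cases rest with
          | nil => simp at hlen
          | cons t1 rest' =>
            simp only [List.getD_cons_zero] at h1
            exact pv_loop_eq t t1 rest' ht h1 16 start out_ hs
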